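-- pv_equiv track=rewrite | github.com/log0824/atbmtt | MaHoaCoDien/MatMaHoanVi.py | tao_bang_hoan_vi
-- ===== SOURCE A (Python) =====
-- def tao_bang_hoan_vi(m, key):
--     so_cot = len(key)
--     hang = (len(m) + so_cot - 1) // so_cot
--     bang = [['X'] * so_cot for _ in range(hang)]
--
--     index = 0
--     for i in range(hang):
--         for j in range(so_cot):
--             if index < len(m):
--                 bang[i][j] = m[index]
--                 index += 1
--     return bang
-- ===== SOURCE B (Python) =====
-- def tao_bang_hoan_vi(m, key):
--     so_cot = len(key)
--     hang = (len(m) + so_cot - 1) // so_cot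
--     total = hang * so_cot
--     padded = [m[i] if i < len(m) else 'X' for i in range(total)]
--     return [padded[r * so_cot:(r + 1) * so_cot] for r in range(hang)]
-- ===== Notes on version B (the rewrite author's own statement) =====
-- stated objective: simpler
-- what changed: Replaces the preallocated grid mutated in place by nested row/column loops with a conditional index counter by a build-then-chunk decomposition: one flat padded comprehension followed by slicing it into rows.
import Mathlib
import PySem

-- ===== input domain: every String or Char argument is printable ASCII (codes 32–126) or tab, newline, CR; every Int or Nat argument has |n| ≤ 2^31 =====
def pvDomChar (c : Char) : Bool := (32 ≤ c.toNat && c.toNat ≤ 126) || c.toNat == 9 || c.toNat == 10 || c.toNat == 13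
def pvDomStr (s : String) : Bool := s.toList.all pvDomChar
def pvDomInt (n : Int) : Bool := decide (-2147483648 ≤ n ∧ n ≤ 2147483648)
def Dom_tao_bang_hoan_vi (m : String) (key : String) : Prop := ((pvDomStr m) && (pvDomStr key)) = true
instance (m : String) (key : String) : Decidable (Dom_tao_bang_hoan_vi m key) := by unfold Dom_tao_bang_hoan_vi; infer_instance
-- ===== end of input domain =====

-- B replaces A's in-place nested row/column fill of a preallocated grid by a
-- build-then-chunk decomposition (flat padded list, then sliced into rows); same result, simpler shape.


-- ===== PORT A =====
def tao_bang_hoan_vi (m : String) (key : String) : List (List String) :=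
  let so_cot : Int := PySem.Str.len key
  let hang : Int := PySem.Int.floordiv (PySem.Str.len m + so_cot - 1) so_cot
  let bang : List (List String) :=
    (PySem.List.pyRange 0 hang 1).map (fun _ => List.replicate so_cot.toNat "X")
  let res :=
    (PySem.List.pyRange 0 hang 1).foldl (fun (st : List (List String) × Int) i =>
      (PySem.List.pyRange 0 so_cot 1).foldl (fun (st : List (List String) × Int) j =>
        if st.2 < PySem.Str.len m then
          (PySem.List.pySetD st.1 i
            (PySem.List.pySetD (PySem.List.pyGetD st.1 i []) j
              (String.ofList [PySem.List.pyGetD m.toList st.2 'X'])),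
           st.2 + 1)
        else st) st) (bang, (0 : Int))
  res.1

-- ===== PORT B =====
def tao_bang_hoan_vi_alt (m : String) (key : String) : List (List String) :=
  let so_cot : Int := PySem.Str.len key
  let hang : Int := PySem.Int.floordiv (PySem.Str.len m + so_cot - 1) so_cot
  let total : Int := hang * so_cot
  let padded : List String :=
    (PySem.List.pyRange 0 total 1).map (fun i =>
      if i < PySem.Str.len m then String.ofList [PySem.List.pyGetD m.toList i 'X'] else "X")
  (PySem.List.pyRange 0 hang 1).map (fun r =>
    PySem.List.slice padded (some (r * so_cot)) (some ((r + 1) * so_cot)))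

-- ===== PRECONDITION & SPEC =====
-- Pre_ excludes key = "" only: there Python A raises ZeroDivisionError (and so does B).
def Pre_tao_bang_hoan_vi (m : String) (key : String) : Prop := key ≠ ""
instance (m : String) (key : String) : Decidable (Pre_tao_bang_hoan_vi m key) := by
  unfold Pre_tao_bang_hoan_vi; infer_instance
def pvWitness_tao_bang_hoan_vi : String × String := ("HELLO", "ab")

def Spec_tao_bang_hoan_vi (m : String) (key : String) (out : List (List String)) : Prop :=
  out = tao_bang_hoan_vi_alt m key
instance (m : String) (key : String) (out : List (List String)) : Decidable (Spec_tao_bang_hoan_vi m key out) := by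
  unfold Spec_tao_bang_hoan_vi; infer_instance

-- ===== CLAIM (what is proved, stated in full; the proofs are below) =====
def Claim_equal_tao_bang_hoan_vi : Prop := ∀ (m : String) (key : String),
  Dom_tao_bang_hoan_vi m key → Pre_tao_bang_hoan_vi m key →
  Spec_tao_bang_hoan_vi m key (tao_bang_hoan_vi m key)

-- ===== LEMMAS AND PROOFS =====

-- 1-character string at position k (the value both programs place at filled cells)
def pvS (mc : List Char) (k : Nat) : String := String.ofList [mc.getD k 'X']

-- the row starting at message offset `start`
def pvRowSpec (mc : List Char) (c start : Nat) : List String :=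
  (List.range c).map (fun j => if start + j < mc.length then pvS mc (start + j) else "X")

-- the common normal form of both programs
def pvTarget (mc : List Char) (c h : Nat) : List (List String) :=
  (List.range h).map (fun r => pvRowSpec mc c (r * c))

-- A's inner-loop body, Nat-indexed
def pvStep (mc : List Char) (i : Nat) (st : List (List String) × Int) (j : Nat) :
    List (List String) × Int :=
  if st.2 < (mc.length : Int) then
    (st.1.set i ((st.1.getD i []).set j (String.ofList [PySem.List.pyGetD mc st.2 'X'])), st.2 + 1)
  else st

-- row after A's inner loop, as a fold over the row only
def pvPatch (mc : List Char) (row : List String) (idx c : Nat) : List String :=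
  (List.range c).foldl
    (fun r j => if idx + j < mc.length then r.set j (pvS mc (idx + j)) else r) row

theorem pv_inner (mc : List Char) (c : Nat) :
    ∀ (bang : List (List String)) (i idx : Nat), i < bang.length → idx ≤ mc.length →
    (List.range c).foldl (pvStep mc i) (bang, (idx : Int)) =
      (bang.set i (pvPatch mc (bang.getD i []) idx c), ((min (idx + c) mc.length : Nat) : Int)) := by
  induction c with
  | zero =>
    intro bang i idx hi hidx
    simp only [List.range_zero, List.foldl_nil, pvPatch]
    rw [List.getD_eq_getElem?_getD, List.getElem?_eq_getElem hi]
    simp [min_eq_left hidx]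
  | succ c ih =>
    intro bang i idx hi hidx
    rw [List.range_succ, List.foldl_append, ih bang i idx hi hidx]
    simp only [List.foldl_cons, List.foldl_nil]
    by_cases hc : idx + c < mc.length
    · have hmin : min (idx + c) mc.length = idx + c := by omega
      rw [pvStep]
      simp only [hmin]
      rw [if_pos (by exact_mod_cast hc)]
      simp only [List.set_set]
      have hget : ((bang.set i (pvPatch mc (bang.getD i []) idx c)).getD i []) =
          pvPatch mc (bang.getD i []) idx c := by
        simp [List.getD_eq_getElem?_getD, hi]
      rw [hget]
      have hpatch : pvPatch mc (bang.getD i []) idx (c+1) =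
          (pvPatch mc (bang.getD i []) idx c).set c (pvS mc (idx + c)) := by
        unfold pvPatch
        rw [List.range_succ, List.foldl_append]
        simp [hc]
      rw [hpatch, Prod.mk.injEq]
      have h2 : min (idx + (c + 1)) mc.length = idx + c + 1 := by omega
      refine ⟨?_, by rw [h2]; push_cast; ring⟩
      simp only [pvS, PySem.List.pyGetD_natCast, List.getD_eq_getElem?_getD]
    · have hmin : min (idx + c) mc.length = mc.length := by omega
      rw [pvStep]
      simp only [hmin]
      rw [if_neg (by omega)]
      have hpatch : pvPatch mc (bang.getD i []) idx (c+1) =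
          pvPatch mc (bang.getD i []) idx c := by
        unfold pvPatch
        rw [List.range_succ, List.foldl_append]
        simp [hc]
      rw [hpatch]
      have h2 : min (idx + (c + 1)) mc.length = mc.length := by omega
      simp [h2]

theorem pv_patch_replicate (mc : List Char) :
    ∀ (c k idx : Nat),
    pvPatch mc (List.replicate (c + k) "X") idx c =
      ((List.range c).map (fun j => if idx + j < mc.length then pvS mc (idx + j) else "X")) ++
        List.replicate k "X" := by
  intro c
  induction c with
  | zero => intro k idx; simp [pvPatch]
  | succ c ih =>
    intro k idx
    unfold pvPatch
    rw [List.range_succ, List.foldl_append]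
    have e1 : (c + 1) + k = c + (k + 1) := by omega
    rw [e1]
    have ihc := ih (k + 1) idx
    unfold pvPatch at ihc
    rw [ihc]
    simp only [List.foldl_cons, List.foldl_nil, List.map_append,
      List.replicate_succ, List.map_cons, List.map_nil]
    by_cases hc : idx + c < mc.length
    · rw [if_pos hc, if_pos hc]
      have hlen : ((List.range c).map (fun j => if idx + j < mc.length then pvS mc (idx + j) else "X")).length = c := by simp
      rw [List.set_append_right _ _ (by omega), hlen]
      simp
    · rw [if_neg hc, if_neg hc]
      simp

theorem pv_rowSpec_min (mc : List Char) (c a : Nat) :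
    pvRowSpec mc c (min a mc.length) = pvRowSpec mc c a := by
  unfold pvRowSpec
  apply List.map_congr_left
  intro j _
  rcases le_or_gt a mc.length with h | h
  · rw [min_eq_left h]
  · have h1 : ¬ (min a mc.length + j < mc.length) := by omega
    have h2 : ¬ (a + j < mc.length) := by omega
    rw [if_neg h1, if_neg h2]

theorem pv_outer (mc : List Char) (c : Nat) :
    ∀ (h2 k : Nat),
    (List.range h2).foldl
        (fun st i => (List.range c).foldl (pvStep mc i) st)
        (List.replicate (h2 + k) (List.replicate c "X"), (0 : Int)) =
      ((List.range h2).map (fun r => pvRowSpec mc c (r * c)) ++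
         List.replicate k (List.replicate c "X"),
       ((min (h2 * c) mc.length : Nat) : Int)) := by
  intro h2
  induction h2 with
  | zero => intro k; simp
  | succ h2 ih =>
    intro k
    rw [List.range_succ, List.foldl_append]
    have e1 : (h2 + 1) + k = h2 + (k + 1) := by omega
    rw [e1, ih (k + 1)]
    simp only [List.foldl_cons, List.foldl_nil]
    have hlenmap : ((List.range h2).map (fun r => pvRowSpec mc c (r * c))).length = h2 := by simp
    rw [pv_inner mc c _ h2 (min (h2 * c) mc.length) (by simp) (by omega)]
    have hget : ((List.range h2).map (fun r => pvRowSpec mc c (r * c)) ++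
        List.replicate (k + 1) (List.replicate c "X")).getD h2 [] = List.replicate c "X" := by
      rw [List.getD_eq_getElem?_getD, List.getElem?_append_right (by omega)]
      simp [hlenmap]
    rw [hget]
    have hpatch : pvPatch mc (List.replicate c "X") (min (h2 * c) mc.length) c =
        pvRowSpec mc c (h2 * c) := by
      have hp := pv_patch_replicate mc c 0 (min (h2 * c) mc.length)
      simp only [Nat.add_zero, List.replicate_zero, List.append_nil] at hp
      rw [hp]
      exact pv_rowSpec_min mc c (h2 * c)
    rw [hpatch]
    rw [Prod.mk.injEq]
    constructor
    · rw [List.set_append_right _ _ (by omega), hlenmap]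
      simp [List.replicate_succ]
    · congr 1
      have e2 : (h2 + 1) * c = h2 * c + c := by ring
      omega

theorem pv_range_drop_take (a c N : Nat) (h : a + c ≤ N) :
    ((List.range N).drop a).take c = (List.range c).map (fun j => a + j) := by
  obtain ⟨k, hk⟩ : ∃ k, N = a + (c + k) := ⟨N - (a + c), by omega⟩
  subst hk
  rw [List.range_add]
  have hd : List.drop a (List.range a ++ (List.range (c+k)).map (fun x => a + x)) =
      (List.range (c+k)).map (fun x => a + x) := by
    have hdl := List.drop_left (l₁ := List.range a) (l₂ := (List.range (c+k)).map (fun x => a + x))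
    simpa using hdl
  rw [hd, ← List.map_take, List.take_range, min_eq_left (by omega)]

theorem pv_hang_cast (n c : Nat) (hc : 1 ≤ c) :
    PySem.Int.floordiv ((n : Int) + (c : Int) - 1) (c : Int) = (((n + c - 1) / c : Nat) : Int) := by
  have e : ((n : Int) + (c : Int) - 1) = (((n + c - 1 : Nat)) : Int) := by omega
  rw [e, PySem.Int.floordiv_natCast]

theorem pv_A_eq (m key : String) (hk : key ≠ "") :
    tao_bang_hoan_vi m key =
      pvTarget m.toList key.toList.length
        ((m.toList.length + key.toList.length - 1) / key.toList.length) := by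
  have hc : 1 ≤ key.toList.length := by
    rcases Nat.eq_zero_or_pos key.toList.length with h0 | h0
    · exfalso; apply hk
      have h2 : key.toList = [] := List.length_eq_zero_iff.mp h0
      simpa using congrArg String.ofList h2
    · exact h0
  unfold tao_bang_hoan_vi
  simp only [PySem.Str.len_eq, pv_hang_cast m.toList.length key.toList.length hc]
  set mc := m.toList with hmc
  set c := key.toList.length with hcdef
  set n := mc.length with hndef
  set hh := (n + c - 1) / c with hhdef
  simp only [PySem.List.pyRange_one, sub_zero, Int.toNat_natCast, zero_add, List.map_map,
    List.foldl_map, Function.comp_def, List.map_const', List.length_range,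
    PySem.List.pySetD_natCast, PySem.List.pyGetD_natCast]
  have ho := pv_outer mc c hh 0
  simp only [Nat.add_zero, List.replicate_zero, List.append_nil] at ho
  exact congrArg Prod.fst ho

theorem pv_B_eq (m key : String) (hk : key ≠ "") :
    tao_bang_hoan_vi_alt m key =
      pvTarget m.toList key.toList.length
        ((m.toList.length + key.toList.length - 1) / key.toList.length) := by
  have hc : 1 ≤ key.toList.length := by
    rcases Nat.eq_zero_or_pos key.toList.length with h0 | h0
    · exfalso; apply hk
      have h2 : key.toList = [] := List.length_eq_zero_iff.mp h0
      simpa using congrArg String.ofList h2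
    · exact h0
  unfold tao_bang_hoan_vi_alt
  simp only [PySem.Str.len_eq, pv_hang_cast m.toList.length key.toList.length hc]
  set mc := m.toList with hmc
  set c := key.toList.length with hcdef
  set n := mc.length with hndef
  set hh := (n + c - 1) / c with hhdef
  rw [show ((hh : Int) * (c : Int)) = ((hh * c : Nat) : Int) from by push_cast; ring]
  rw [PySem.List.pyRange_one, PySem.List.pyRange_one]
  simp only [List.map_map, sub_zero, Int.toNat_natCast, zero_add]
  apply List.map_congr_left
  intro rk hrk
  simp only [Function.comp_apply]
  have hrk' : rk < hh := List.mem_range.mp hrk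
  rw [show ((rk : Int) * (c : Int)) = ((rk * c : Nat) : Int) from by push_cast; ring]
  rw [show (((rk : Int)) + 1) * (c : Int) = ((rk * c + c : Nat) : Int) from by push_cast; ring]
  rw [PySem.List.slice_natCast]
  rw [show rk * c + c - rk * c = c from by omega]
  rw [← List.map_drop, ← List.map_take]
  have hbound : rk * c + c ≤ hh * c := by
    have : (rk + 1) * c ≤ hh * c := Nat.mul_le_mul_right c hrk'
    calc rk * c + c = (rk + 1) * c := by ring
    _ ≤ hh * c := this
  rw [pv_range_drop_take (rk * c) c (hh * c) hbound, List.map_map]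
  unfold pvRowSpec
  apply List.map_congr_left
  intro j hj
  simp only [Function.comp_apply, PySem.List.pyGetD_natCast, Nat.cast_lt]
  simp [pvS, List.getD_eq_getElem?_getD]

-- ===== VERDICT (by name: the statement is the Claim_ definition above) =====
theorem tao_bang_hoan_vi_spec : Claim_equal_tao_bang_hoan_vi := by
  intro m key _ hpre
  unfold Spec_tao_bang_hoan_vi
  rw [pv_A_eq m key hpre, pv_B_eq m key hpre]
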